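-- pv_equiv track=rewrite | github.com/trustgraph-ai/trustgraph | translate_docs.py | _parse_langs
-- ===== SOURCE A (Python) =====
-- from typing import Dict, Iterable, List, Optional, Sequence, Tuple
--
-- LANGUAGES: Dict[str, str] = {
--     "Spanish": "es",
--     "Swahili": "sw",
--     "Portuguese": "pt",
--     "Turkish": "tr",
--     "Hindi": "hi",
--     "Hebrew": "he",
--     "Arabic": "ar",
--     "Chinese (simplified)": "zh-cn",
--     "Russian": "ru",
-- }
--
-- def _parse_langs(arg: Optional[str]) -> Dict[str, str]:
--     if not arg:
--         return dict(LANGUAGES)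
--
--     wanted = {a.strip().lower() for a in arg.split(",") if a.strip()}
--     resolved: Dict[str, str] = {}
--
--     for name, code in LANGUAGES.items():
--         if name.lower() in wanted or code.lower() in wanted:
--             resolved[name] = code
--
--     unknown = wanted - {n.lower() for n in LANGUAGES.keys()} - {c.lower() for c in LANGUAGES.values()}
--     if unknown:
--         raise SystemExit(f"Unknown languages: {', '.join(sorted(unknown))}")
--     return resolved
-- ===== SOURCE B (Python) =====
-- from typing import Dict, Optional
--
-- LANGUAGES: Dict[str, str] = {
--     "Spanish": "es",
--     "Swahili": "sw",
--     "Portuguese": "pt",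
--     "Turkish": "tr",
--     "Hindi": "hi",
--     "Hebrew": "he",
--     "Arabic": "ar",
--     "Chinese (simplified)": "zh-cn",
--     "Russian": "ru",
-- }
--
-- def _parse_langs(arg: Optional[str]) -> Dict[str, str]:
--     if not arg:
--         return dict(LANGUAGES)
--
--     idx: Dict[str, str] = {}
--     for name, code in LANGUAGES.items():
--         idx[name.lower()] = name
--         idx[code.lower()] = name
--
--     selected = set()
--     unknown = set()
--     for tok in arg.split(","):
--         t = tok.strip().lower()
--         if not t:
--             continue
--         name = idx.get(t)
--         if name is None:
--             unknown.add(t)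
--         else:
--             selected.add(name)
--
--     if unknown:
--         raise SystemExit(f"Unknown languages: {', '.join(sorted(unknown))}")
--     return {name: code for name, code in LANGUAGES.items() if name in selected}
-- ===== Notes on version B (the rewrite author's own statement) =====
-- stated objective: alternative
-- what changed: B inverts the lookup: it builds an index from lowercased name/code to canonical name once and resolves each token in a single pass over the tokens (collecting selected/unknown sets), instead of A's scan over LANGUAGES testing each name and code for membership in the wanted-token set.
import Mathlib
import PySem

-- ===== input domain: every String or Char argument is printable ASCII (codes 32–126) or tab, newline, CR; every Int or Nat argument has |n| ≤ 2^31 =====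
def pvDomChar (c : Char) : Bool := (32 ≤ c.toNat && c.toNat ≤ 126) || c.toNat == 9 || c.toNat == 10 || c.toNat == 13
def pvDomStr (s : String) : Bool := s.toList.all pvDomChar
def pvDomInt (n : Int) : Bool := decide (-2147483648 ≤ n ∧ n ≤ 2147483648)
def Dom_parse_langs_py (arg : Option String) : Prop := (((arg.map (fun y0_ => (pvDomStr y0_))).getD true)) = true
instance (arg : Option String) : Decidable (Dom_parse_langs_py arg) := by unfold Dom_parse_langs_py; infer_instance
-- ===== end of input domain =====

-- B replaces A's per-language membership scan of the wanted-token set by an inverse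
-- lookup table (lowercased name/code -> canonical name) and a single pass over the
-- tokens; objective: alternative decomposition, same observable behaviour.
-- On inputs naming an unknown language the Python A raises SystemExit; both Pythons
-- raise there (same message), and Pre_ excludes exactly those inputs.

-- ===== PORT A =====
def pvLANGS : List (String × String) := [("Spanish","es"),("Swahili","sw"),("Portuguese","pt"),("Turkish","tr"),("Hindi","hi"),("Hebrew","he"),("Arabic","ar"),("Chinese (simplified)","zh-cn"),("Russian","ru")]

-- s.split(","): the separator is nonempty, so split? is always `some`
def pvTokens (s : String) : List String := (PySem.Str.split? s ",").getD []

-- wanted = the set of a.strip().lower() for a in arg.split(",") if a.strip()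
def pvWanted (ts : List String) : PySem.Set String :=
  PySem.Set.ofList ((ts.filter (fun a => !(PySem.Str.strip a == ""))).map
    (fun a => PySem.Str.lower (PySem.Str.strip a)))

-- port of A; the SystemExit branch never returns and lies outside Pre_parse_langs_py
def parse_langs_py (arg : Option String) : List (String × String) :=
  match arg with
  | none => pvLANGS
  | some s =>
    if s = "" then pvLANGS
    else
      let wanted := pvWanted (pvTokens s)
      let resolved : PySem.Dict String String :=
        pvLANGS.foldl (fun d p =>
          if PySem.Set.contains wanted (PySem.Str.lower p.1)
              || PySem.Set.contains wanted (PySem.Str.lower p.2)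
          then d.insert p.1 p.2 else d) PySem.Dict.empty
      resolved.items

-- ===== PORT B =====
-- idx: lowercased name/code -> canonical name
def pvIdx : PySem.Dict String String :=
  pvLANGS.foldl (fun d p =>
    (d.insert (PySem.Str.lower p.1) p.1).insert (PySem.Str.lower p.2) p.1)
    PySem.Dict.empty

-- loop body of B's single pass over the tokens; the state is (selected, unknown)
def pvStepB (st : PySem.Set String × PySem.Set String) (tok : String) :
    PySem.Set String × PySem.Set String :=
  let t := PySem.Str.lower (PySem.Str.strip tok)
  if t = "" then st
  else
    match pvIdx.get? t with
    | some name => (PySem.Set.add st.1 name, st.2)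
    | none => (st.1, PySem.Set.add st.2 t)

-- port of B; the SystemExit branch (unknown nonempty) never returns, outside Pre_
def parse_langs_py_alt (arg : Option String) : List (String × String) :=
  match arg with
  | none => pvLANGS
  | some s =>
    if s = "" then pvLANGS
    else
      let st := (pvTokens s).foldl pvStepB (PySem.Set.empty, PySem.Set.empty)
      pvLANGS.filter (fun p => PySem.Set.contains st.1 p.1)

-- ===== PRECONDITION & SPEC =====
def pvKnown : List String := ["spanish","es","swahili","sw","portuguese","pt","turkish","tr","hindi","hi","hebrew","he","arabic","ar","chinese (simplified)","zh-cn","russian","ru"]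

-- Pre_ excludes exactly the inputs on which some nonempty token names no known
-- language: there the Python A raises SystemExit and returns nothing.
def Pre_parse_langs_py (arg : Option String) : Prop :=
  match arg with
  | none => True
  | some s =>
    s = "" ∨ ∀ a ∈ pvTokens s,
      PySem.Str.strip a ≠ "" → PySem.Str.lower (PySem.Str.strip a) ∈ pvKnown

instance (arg : Option String) : Decidable (Pre_parse_langs_py arg) := by
  unfold Pre_parse_langs_py; cases arg <;> infer_instance

def pvWitness_parse_langs_py : Option String := (some "es, Hebrew ,RUSSIAN")

def Spec_parse_langs_py (arg : Option String) (out : List (String × String)) : Prop :=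
  out = parse_langs_py_alt arg
instance (arg : Option String) (out : List (String × String)) :
    Decidable (Spec_parse_langs_py arg out) := by unfold Spec_parse_langs_py; infer_instance

-- ===== CLAIM (what is proved, stated in full; the proofs are below) =====
def Claim_equal_parse_langs_py : Prop := ∀ (arg : Option String), Dom_parse_langs_py arg → Pre_parse_langs_py arg → Spec_parse_langs_py arg (parse_langs_py arg)

-- ===== LEMMAS AND PROOFS =====

-- a loop over fresh, pairwise distinct keys builds a dict whose items are the filter
lemma items_foldl_filter (l : List (String × String)) (d : PySem.Dict String String)
    (p : String × String → Bool)
    (hfresh : ∀ q ∈ l, d.contains q.1 = false)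
    (hnd : (l.map Prod.fst).Nodup) :
    (l.foldl (fun d q => if p q then d.insert q.1 q.2 else d) d).items
      = d.items ++ l.filter p := by
  induction l generalizing d with
  | nil => simp
  | cons q l ih =>
    rw [List.map_cons, List.nodup_cons] at hnd
    have hq : d.contains q.1 = false := hfresh q List.mem_cons_self
    have htl : ∀ r ∈ l, d.contains r.1 = false :=
      fun r hr => hfresh r (List.mem_cons_of_mem _ hr)
    rw [List.foldl_cons, List.filter_cons]
    cases hp : p q with
    | false =>
      simp only [Bool.false_eq_true, if_false]
      exact ih d htl hnd.2
    | true =>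
      simp only [if_true]
      rw [ih (d.insert q.1 q.2) ?_ hnd.2]
      · rw [PySem.Dict.items_insert_of_not_contains d q.2 hq]
        simp
      · intro r hr
        rw [PySem.Dict.contains_insert]
        have hne : r.1 ≠ q.1 := fun h => hnd.1 (h ▸ List.mem_map_of_mem hr)
        simp [hne, htl r hr]

lemma pvIdx_eq : pvIdx = PySem.Dict.mk [("spanish","Spanish"),("es","Spanish"),("swahili","Swahili"),("sw","Swahili"),("portuguese","Portuguese"),("pt","Portuguese"),("turkish","Turkish"),("tr","Turkish"),("hindi","Hindi"),("hi","Hindi"),("hebrew","Hebrew"),("he","Hebrew"),("arabic","Arabic"),("ar","Arabic"),("chinese (simplified)","Chinese (simplified)"),("zh-cn","Chinese (simplified)"),("russian","Russian"),("ru","Russian")] := by decide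

-- first-match lookup in an association list with pairwise distinct keys
lemma get?_mk_eq_some_iff (l : List (String × String)) (hnd : (l.map Prod.fst).Nodup)
    (t n : String) : (PySem.Dict.mk l).get? t = some n ↔ (t, n) ∈ l := by
  induction l with
  | nil => simp [PySem.Dict.get?]
  | cons p l ih =>
    obtain ⟨k, v⟩ := p
    rw [PySem.Dict.get?_mk_cons]
    rw [List.map_cons, List.nodup_cons] at hnd
    by_cases hk : (k == t) = true
    · rw [if_pos hk]
      rw [beq_iff_eq] at hk
      subst hk
      constructor
      · intro h
        rw [← Option.some.inj h]
        exact List.mem_cons_self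
      · intro h
        rcases List.mem_cons.mp h with h | h
        · obtain ⟨-, rfl⟩ := Prod.mk.inj h
          rfl
        · exact absurd (List.mem_map_of_mem h) hnd.1
    · rw [if_neg hk, ih hnd.2]
      rw [beq_iff_eq] at hk
      constructor
      · exact fun h => List.mem_cons_of_mem _ h
      · intro h
        rcases List.mem_cons.mp h with h | h
        · exact absurd (Prod.mk.inj h).1.symm hk
        · exact h

lemma get?_idx_0 (t : String) : pvIdx.get? t = some "Spanish" ↔ t = "spanish" ∨ t = "es" := by
  rw [pvIdx_eq, get?_mk_eq_some_iff _ (by decide)]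
  simp

lemma get?_idx_1 (t : String) : pvIdx.get? t = some "Swahili" ↔ t = "swahili" ∨ t = "sw" := by
  rw [pvIdx_eq, get?_mk_eq_some_iff _ (by decide)]
  simp

lemma get?_idx_2 (t : String) : pvIdx.get? t = some "Portuguese" ↔ t = "portuguese" ∨ t = "pt" := by
  rw [pvIdx_eq, get?_mk_eq_some_iff _ (by decide)]
  simp

lemma get?_idx_3 (t : String) : pvIdx.get? t = some "Turkish" ↔ t = "turkish" ∨ t = "tr" := by
  rw [pvIdx_eq, get?_mk_eq_some_iff _ (by decide)]
  simp

lemma get?_idx_4 (t : String) : pvIdx.get? t = some "Hindi" ↔ t = "hindi" ∨ t = "hi" := by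
  rw [pvIdx_eq, get?_mk_eq_some_iff _ (by decide)]
  simp

lemma get?_idx_5 (t : String) : pvIdx.get? t = some "Hebrew" ↔ t = "hebrew" ∨ t = "he" := by
  rw [pvIdx_eq, get?_mk_eq_some_iff _ (by decide)]
  simp

lemma get?_idx_6 (t : String) : pvIdx.get? t = some "Arabic" ↔ t = "arabic" ∨ t = "ar" := by
  rw [pvIdx_eq, get?_mk_eq_some_iff _ (by decide)]
  simp

lemma get?_idx_7 (t : String) : pvIdx.get? t = some "Chinese (simplified)" ↔ t = "chinese (simplified)" ∨ t = "zh-cn" := by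
  rw [pvIdx_eq, get?_mk_eq_some_iff _ (by decide)]
  simp

lemma get?_idx_8 (t : String) : pvIdx.get? t = some "Russian" ↔ t = "russian" ∨ t = "ru" := by
  rw [pvIdx_eq, get?_mk_eq_some_iff _ (by decide)]
  simp

-- membership in the selected set after B's token pass
lemma mem_fold_sel (ts : List String) (st : PySem.Set String × PySem.Set String) (n : String) :
    n ∈ (ts.foldl pvStepB st).1
      ↔ n ∈ st.1 ∨ ∃ tok ∈ ts, pvIdx.get? (PySem.Str.lower (PySem.Str.strip tok)) = some n := by
  induction ts generalizing st with
  | nil => simp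
  | cons tok ts ih =>
    rw [List.foldl_cons, ih]
    by_cases ht : PySem.Str.lower (PySem.Str.strip tok) = ""
    · have hstep : pvStepB st tok = st := by simp [pvStepB, ht]
      have hnone : pvIdx.get? (PySem.Str.lower (PySem.Str.strip tok)) = none := by
        rw [ht]; decide
      rw [hstep]
      simp only [List.mem_cons]
      constructor
      · rintro (h | h)
        · exact Or.inl h
        · obtain ⟨a, ha, hg2⟩ := h
          exact Or.inr ⟨a, Or.inr ha, hg2⟩
      · rintro (h | ⟨a, ha | ha, hg⟩)
        · exact Or.inl h
        · rw [ha, hnone] at hg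
          simp at hg
        · exact Or.inr ⟨a, ha, hg⟩
    · cases hg : pvIdx.get? (PySem.Str.lower (PySem.Str.strip tok)) with
      | none =>
        have hstep : pvStepB st tok
            = (st.1, PySem.Set.add st.2 (PySem.Str.lower (PySem.Str.strip tok))) := by
          simp [pvStepB, ht, hg]
        rw [hstep]
        simp only [List.mem_cons]
        constructor
        · rintro (h | h)
          · exact Or.inl h
          · obtain ⟨a, ha, hg2⟩ := h
            exact Or.inr ⟨a, Or.inr ha, hg2⟩
        · rintro (h | ⟨a, ha | ha, hga⟩)
          · exact Or.inl h
          · rw [ha, hg] at hga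
            simp at hga
          · exact Or.inr ⟨a, ha, hga⟩
      | some name =>
        have hstep : pvStepB st tok = (PySem.Set.add st.1 name, st.2) := by
          simp [pvStepB, ht, hg]
        rw [hstep]
        simp only [PySem.Set.mem_add, List.mem_cons]
        constructor
        · rintro ((h | h) | h)
          · exact Or.inl h
          · exact Or.inr ⟨tok, Or.inl rfl, by rw [hg, h]⟩
          · obtain ⟨a, ha, hg2⟩ := h
            exact Or.inr ⟨a, Or.inr ha, hg2⟩
        · rintro (h | ⟨a, ha | ha, hga⟩)
          · exact Or.inl (Or.inl h)
          · rw [ha, hg] at hga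
            exact Or.inl (Or.inr (Option.some.inj hga).symm)
          · exact Or.inr ⟨a, ha, hga⟩

lemma lower_empty : PySem.Str.lower "" = "" := by decide

-- the two filter conditions agree, generically in (lowered name, code, canonical name)
lemma cond_bridge (ts : List String) (ln c N : String)
    (hchar : ∀ t, pvIdx.get? t = some N ↔ t = ln ∨ t = c)
    (hln : ln ≠ "") (hc : c ≠ "") :
    (PySem.Set.contains (pvWanted ts) ln || PySem.Set.contains (pvWanted ts) c)
      = PySem.Set.contains ((ts.foldl pvStepB (PySem.Set.empty, PySem.Set.empty)).1) N := by
  rw [Bool.eq_iff_iff]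
  simp only [Bool.or_eq_true, PySem.Set.contains_iff]
  rw [mem_fold_sel]
  simp only [pvWanted, PySem.Set.mem_ofList, List.mem_map, List.mem_filter,
    Bool.not_eq_eq_eq_not, Bool.not_true, beq_eq_false_iff_ne, ne_eq, hchar]
  constructor
  · rintro (⟨a, ⟨ha, hne⟩, heq⟩ | ⟨a, ⟨ha, hne⟩, heq⟩)
    · exact Or.inr ⟨a, ha, Or.inl heq⟩
    · exact Or.inr ⟨a, ha, Or.inr heq⟩
  · rintro (h | ⟨a, ha, heq | heq⟩)
    · exact absurd h (by simp [PySem.Set.empty])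
    · refine Or.inl ⟨a, ⟨ha, ?_⟩, heq⟩
      intro h0
      rw [h0, lower_empty] at heq
      exact hln heq.symm
    · refine Or.inr ⟨a, ⟨ha, ?_⟩, heq⟩
      intro h0
      rw [h0, lower_empty] at heq
      exact hc heq.symm

-- ===== VERDICT (by name: the statement is the Claim_ definition above) =====
theorem parse_langs_py_spec : Claim_equal_parse_langs_py := by
  intro arg _ _
  unfold Spec_parse_langs_py
  cases arg with
  | none => rfl
  | some s =>
    by_cases hs : s = ""
    · simp [parse_langs_py, parse_langs_py_alt, hs]
    · simp only [parse_langs_py, parse_langs_py_alt, if_neg hs]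
      rw [items_foldl_filter _ _ _
        (by intro q _; simp [PySem.Dict.contains_empty]) (by decide)]
      rw [show (PySem.Dict.empty : PySem.Dict String String).items = [] from rfl,
        List.nil_append]
      apply List.filter_congr
      intro p hp
      fin_cases hp <;> dsimp only
      · rw [show PySem.Str.lower "Spanish" = "spanish" by decide,
          show PySem.Str.lower "es" = "es" by decide]
        exact cond_bridge (pvTokens s) "spanish" "es" "Spanish" get?_idx_0 (by decide) (by decide)
      · rw [show PySem.Str.lower "Swahili" = "swahili" by decide,
          show PySem.Str.lower "sw" = "sw" by decide]
        exact cond_bridge (pvTokens s) "swahili" "sw" "Swahili" get?_idx_1 (by decide) (by decide)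
      · rw [show PySem.Str.lower "Portuguese" = "portuguese" by decide,
          show PySem.Str.lower "pt" = "pt" by decide]
        exact cond_bridge (pvTokens s) "portuguese" "pt" "Portuguese" get?_idx_2 (by decide) (by decide)
      · rw [show PySem.Str.lower "Turkish" = "turkish" by decide,
          show PySem.Str.lower "tr" = "tr" by decide]
        exact cond_bridge (pvTokens s) "turkish" "tr" "Turkish" get?_idx_3 (by decide) (by decide)
      · rw [show PySem.Str.lower "Hindi" = "hindi" by decide,
          show PySem.Str.lower "hi" = "hi" by decide]
        exact cond_bridge (pvTokens s) "hindi" "hi" "Hindi" get?_idx_4 (by decide) (by decide)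
      · rw [show PySem.Str.lower "Hebrew" = "hebrew" by decide,
          show PySem.Str.lower "he" = "he" by decide]
        exact cond_bridge (pvTokens s) "hebrew" "he" "Hebrew" get?_idx_5 (by decide) (by decide)
      · rw [show PySem.Str.lower "Arabic" = "arabic" by decide,
          show PySem.Str.lower "ar" = "ar" by decide]
        exact cond_bridge (pvTokens s) "arabic" "ar" "Arabic" get?_idx_6 (by decide) (by decide)
      · rw [show PySem.Str.lower "Chinese (simplified)" = "chinese (simplified)" by decide,
          show PySem.Str.lower "zh-cn" = "zh-cn" by decide]
        exact cond_bridge (pvTokens s) "chinese (simplified)" "zh-cn" "Chinese (simplified)" get?_idx_7 (by decide) (by decide)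
      · rw [show PySem.Str.lower "Russian" = "russian" by decide,
          show PySem.Str.lower "ru" = "ru" by decide]
        exact cond_bridge (pvTokens s) "russian" "ru" "Russian" get?_idx_8 (by decide) (by decide)
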